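-- pv_equiv track=rewrite | github.com/justzino/algorithms | Programmers/2021-Kakao-Internship/2.py | find_dist2_people
-- ===== SOURCE A (Python) =====
-- def find_dist2_people(place, location):
--     # 맨해튼 거리 == 2 인 move 8개
--     dx = [-2, -1, -1, 0, 0, 1, 1, 2]
--     dy = [0, -1, 1, -2, 2, -1, 1, 0]
--
--     result = []
--     x, y = location[0], location[1]
--     for i in range(8):
--         nx = x + dx[i]
--         ny = y + dy[i]
--
--         if 0 <= nx <= 4 and 0 <= ny <= 4 and place[nx][ny] == 'P':
--             result.append((nx, ny))
--
--     return result
-- ===== SOURCE B (Python) =====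
-- def find_dist2_people(place, location):
--     # Scan the whole 5x5 grid and keep the cells at Manhattan distance 2.
--     x, y = location[0], location[1]
--     result = []
--     for nx in range(5):
--         for ny in range(5):
--             if abs(nx - x) + abs(ny - y) == 2 and place[nx][ny] == 'P':
--                 result.append((nx, ny))
--     return result
-- ===== Notes on version B (the rewrite author's own statement) =====
-- stated objective: alternative
-- what changed: Replaces the 8 hard-coded offset candidates with a nested scan of the whole 5x5 grid selecting cells at Manhattan distance exactly 2.
import Mathlib
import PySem

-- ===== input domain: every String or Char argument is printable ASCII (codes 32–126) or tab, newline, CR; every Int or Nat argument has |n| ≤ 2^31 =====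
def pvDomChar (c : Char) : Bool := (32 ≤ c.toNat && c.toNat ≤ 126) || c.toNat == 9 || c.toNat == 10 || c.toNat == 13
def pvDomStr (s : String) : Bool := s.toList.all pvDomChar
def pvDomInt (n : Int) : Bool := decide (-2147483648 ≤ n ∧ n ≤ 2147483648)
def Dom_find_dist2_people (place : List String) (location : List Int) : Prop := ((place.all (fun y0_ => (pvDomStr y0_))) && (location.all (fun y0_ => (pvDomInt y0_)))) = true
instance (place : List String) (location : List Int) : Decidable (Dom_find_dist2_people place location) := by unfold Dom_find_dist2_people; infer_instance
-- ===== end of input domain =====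

-- B scans the whole 5x5 grid for cells at Manhattan distance 2 instead of testing A's 8 hard-coded offsets; alternative decomposition, same cost.

-- ===== PORT A =====
def find_dist2_people (place : List String) (location : List Int) : List (Int × Int) :=
  let dx : List Int := [-2, -1, -1, 0, 0, 1, 1, 2]
  let dy : List Int := [0, -1, 1, -2, 2, -1, 1, 0]
  match PySem.List.pyGet? location 0, PySem.List.pyGet? location 1 with
  | some x, some y =>
      (PySem.List.pyRange 0 8 1).foldl (fun result i =>
        if (decide (0 ≤ x + PySem.List.pyGetD dx i 0) && decide (x + PySem.List.pyGetD dx i 0 ≤ 4) &&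
            decide (0 ≤ y + PySem.List.pyGetD dy i 0) && decide (y + PySem.List.pyGetD dy i 0 ≤ 4)) &&
           (((PySem.List.pyGet? place (x + PySem.List.pyGetD dx i 0)).bind
              (fun row => PySem.Str.pyGet? row (y + PySem.List.pyGetD dy i 0))) == some 'P')
        then result ++ [(x + PySem.List.pyGetD dx i 0, y + PySem.List.pyGetD dy i 0)]
        else result) []
  | _, _ => []  -- location[0]/location[1] raises in Python; excluded by Pre_

-- ===== PORT B =====
def find_dist2_people_alt (place : List String) (location : List Int) : List (Int × Int) :=
  match PySem.List.pyGet? location 0 with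
  | none => []  -- location[0] raises in Python; excluded by Pre_
  | some x =>
    match PySem.List.pyGet? location 1 with
    | none => []  -- location[1] raises in Python; excluded by Pre_
    | some y =>
      (PySem.List.pyRange 0 5 1).foldl (fun result nx =>
        (PySem.List.pyRange 0 5 1).foldl (fun result ny =>
          if ((nx - x).natAbs + (ny - y).natAbs == 2) &&
             (((PySem.List.pyGet? place nx).bind (fun row => PySem.Str.pyGet? row ny)) == some 'P')
          then result ++ [(nx, ny)]
          else result) result) []

-- ===== PRECONDITION & SPEC =====
-- Pre_ excludes exactly the inputs where Python A raises (IndexError): location shorter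
-- than 2, or some in-grid cell at Manhattan distance 2 from the location lies outside
-- the actual shape of place.  B raises on exactly the same inputs.
def Pre_find_dist2_people (place : List String) (location : List Int) : Prop :=
  2 ≤ location.length ∧
  ∀ nx : Nat, nx < 5 → ∀ ny : Nat, ny < 5 →
    ((nx : Int) - location.getD 0 0).natAbs + ((ny : Int) - location.getD 1 0).natAbs = 2 →
    nx < place.length ∧ ny < (place.getD nx "").toList.length
instance (place : List String) (location : List Int) : Decidable (Pre_find_dist2_people place location) := by unfold Pre_find_dist2_people; infer_instance

def pvWitness_find_dist2_people : List String × List Int :=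
  (["PPPPP", "PPPPP", "PPPPP", "PPPPP", "PPPPP"], [2, 2])

def Spec_find_dist2_people (place : List String) (location : List Int) (out : List (Int × Int)) : Prop := out = find_dist2_people_alt place location
instance (place : List String) (location : List Int) (out : List (Int × Int)) : Decidable (Spec_find_dist2_people place location out) := by unfold Spec_find_dist2_people; infer_instance

-- ===== CLAIM (what is proved, stated in full; the proofs are below) =====
def Claim_equal_find_dist2_people : Prop := ∀ (place : List String) (location : List Int), Dom_find_dist2_people place location → Pre_find_dist2_people place location → Spec_find_dist2_people place location (find_dist2_people place location)

-- ===== LEMMAS AND PROOFS =====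

def pvF (x y i : Int) : Int × Int :=
  (x + PySem.List.pyGetD [-2,-1,-1,0,0,1,1,2] i 0, y + PySem.List.pyGetD [0,-1,1,-2,2,-1,1,0] i 0)

-- the grid test: place[nx][ny] == 'P' (none = index out of range)
def pvQ (place : List String) (c : Int × Int) : Bool :=
  ((PySem.List.pyGet? place c.1).bind (fun row => PySem.Str.pyGet? row c.2)) == some 'P'

def pvIn (c : Int × Int) : Bool :=
  decide (0 ≤ c.1) && decide (c.1 ≤ 4) && decide (0 ≤ c.2) && decide (c.2 ≤ 4)

def pvDist (x y : Int) (c : Int × Int) : Bool := (c.1 - x).natAbs + (c.2 - y).natAbs == 2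

def pvCands (x y : Int) : List (Int × Int) :=
  [(x-2,y),(x-1,y-1),(x-1,y+1),(x,y-2),(x,y+2),(x+1,y-1),(x+1,y+1),(x+2,y)]

def pvGrid : List (Int × Int) :=
  [(0,0),(0,1),(0,2),(0,3),(0,4),(1,0),(1,1),(1,2),(1,3),(1,4),
   (2,0),(2,1),(2,2),(2,3),(2,4),(3,0),(3,1),(3,2),(3,3),(3,4),
   (4,0),(4,1),(4,2),(4,3),(4,4)]

lemma pv_geom (x y : Int) :
    (pvCands x y).filter pvIn = pvGrid.filter (pvDist x y) := by
  by_cases h : -2 ≤ x ∧ x ≤ 6 ∧ -2 ≤ y ∧ y ≤ 6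
  · obtain ⟨h1, h2, h3, h4⟩ := h
    interval_cases x <;> interval_cases y <;> decide
  · have hl : (pvCands x y).filter pvIn = [] := by
      rw [List.filter_eq_nil_iff]; intro c hc
      fin_cases hc <;> simp [pvIn] <;> omega
    have hr : pvGrid.filter (pvDist x y) = [] := by
      rw [List.filter_eq_nil_iff]; intro c hc
      fin_cases hc <;> simp [pvDist] <;> omega
    rw [hl, hr]

lemma pv_filter_map {α β : Type} (f : α → β) (P : β → Bool) (l : List α) :
    (l.filter (fun a => P (f a))).map f = (l.map f).filter P := by
  induction l with
  | nil => rfl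
  | cons a l ih => simp only [List.filter, List.map]; cases P (f a) <;> simp [ih]

lemma pv_A_char (place : List String) (x y : Int) (location : List Int)
    (h0 : PySem.List.pyGet? location 0 = some x)
    (h1 : PySem.List.pyGet? location 1 = some y) :
    find_dist2_people place location
      = (pvCands x y).filter (fun c => pvIn c && pvQ place c) := by
  simp only [find_dist2_people, h0, h1]
  refine Eq.trans (PySem.List.foldl_append_if
        (l := PySem.List.pyRange 0 8 1) (acc := [])
        (p := fun i : Int => pvIn (pvF x y i) && pvQ place (pvF x y i))
        (f := fun i : Int => pvF x y i)) ?_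
  rw [pv_filter_map (f := pvF x y) (P := fun c => pvIn c && pvQ place c)]
  rw [show (PySem.List.pyRange 0 8 1).map (pvF x y) = pvCands x y from by
        simp [pvF, pvCands, show PySem.List.pyRange 0 8 1 = [0,1,2,3,4,5,6,7] from by decide,
              PySem.List.pyGetD, PySem.List.pyGet?, PySem.List.pyIdx?]
        omega]
  simp

lemma pv_inner (place : List String) (x y nx : Int) (r : List (Int × Int)) :
    (PySem.List.pyRange 0 5 1).foldl (fun result ny =>
      if ((nx - x).natAbs + (ny - y).natAbs == 2) &&
         (((PySem.List.pyGet? place nx).bind (fun row => PySem.Str.pyGet? row ny)) == some 'P')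
      then result ++ [(nx, ny)] else result) r
    = r ++ (([0,1,2,3,4] : List Int).filter
              (fun ny => pvDist x y (nx, ny) && pvQ place (nx, ny))).map (fun ny => (nx, ny)) := by
  refine Eq.trans (PySem.List.foldl_append_if (l := PySem.List.pyRange 0 5 1) (acc := r)
      (p := fun ny => pvDist x y (nx, ny) && pvQ place (nx, ny))
      (f := fun ny => (nx, ny))) ?_
  rw [show PySem.List.pyRange 0 5 1 = [0,1,2,3,4] from by decide]

lemma pv_B_char (place : List String) (x y : Int) (location : List Int)
    (h0 : PySem.List.pyGet? location 0 = some x)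
    (h1 : PySem.List.pyGet? location 1 = some y) :
    find_dist2_people_alt place location
      = pvGrid.filter (fun c => pvDist x y c && pvQ place c) := by
  simp only [find_dist2_people_alt, h0, h1]
  simp only [pv_inner place x y]
  rw [PySem.List.foldl_append_eq_flatMap]
  rw [show PySem.List.pyRange 0 5 1 = [0,1,2,3,4] from by decide]
  simp only [List.flatMap_cons, List.flatMap_nil, List.nil_append, List.append_nil]
  rw [pv_filter_map (f := fun ny : Int => ((0:Int), ny)) (P := fun c => pvDist x y c && pvQ place c),
      pv_filter_map (f := fun ny : Int => ((1:Int), ny)) (P := fun c => pvDist x y c && pvQ place c),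
      pv_filter_map (f := fun ny : Int => ((2:Int), ny)) (P := fun c => pvDist x y c && pvQ place c),
      pv_filter_map (f := fun ny : Int => ((3:Int), ny)) (P := fun c => pvDist x y c && pvQ place c),
      pv_filter_map (f := fun ny : Int => ((4:Int), ny)) (P := fun c => pvDist x y c && pvQ place c)]
  rw [← List.filter_append, ← List.filter_append, ← List.filter_append, ← List.filter_append]
  rfl

-- ===== VERDICT (by name: the statement is the Claim_ definition above) =====
theorem find_dist2_people_spec : Claim_equal_find_dist2_people := by
  intro place location _ hpre
  unfold Spec_find_dist2_people
  obtain ⟨hlen, -⟩ := hpre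
  obtain ⟨x, y, rest, rfl⟩ : ∃ a b r, location = a :: b :: r := by
    match location, hlen with
    | a :: b :: r, _ => exact ⟨a, b, r, rfl⟩
  have hx : PySem.List.pyGet? (x :: y :: rest) (0 : Int) = some x := by
    simp only [PySem.List.pyGet?, PySem.List.pyIdx?]
    rw [if_pos (by positivity), if_pos (by omega)]
    rfl
  have hy : PySem.List.pyGet? (x :: y :: rest) (1 : Int) = some y := by
    simp only [PySem.List.pyGet?, PySem.List.pyIdx?]
    rw [if_pos (by positivity), if_pos (by omega)]
    rfl
  rw [pv_A_char place x y _ hx hy, pv_B_char place x y _ hx hy]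
  rw [show (fun c => pvIn c && pvQ place c) = (fun c => pvQ place c && pvIn c) from by
        funext c; exact Bool.and_comm _ _]
  rw [show (fun c => pvDist x y c && pvQ place c) = (fun c => pvQ place c && pvDist x y c) from by
        funext c; exact Bool.and_comm _ _]
  rw [← List.filter_filter, ← List.filter_filter, pv_geom]
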